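-- pv_equiv track=rewrite | github.com/j-bernardi/pessimistic-agents | faithful/ints_to_str.py | highest_n_choose_k_below_x
-- ===== SOURCE A (Python) =====
-- import math
--
-- def highest_n_choose_k_below_x(x, k):
--     n = k
--     while True:
--         if n_choose_k(n, k) > x:
--             break
--         n += 1
--     n -= 1
--     return n
--
-- def n_choose_k(n, k):
--     prod = 1
--     for i in range(k):
--         prod *= n - i
--     return prod // math.factorial(k)
-- ===== SOURCE B (Python) =====
-- import math
--
-- def highest_n_choose_k_below_x(x, k):
--     # largest n with C(n,k) <= x, found by exponential bracketing + binary search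
--     if math.comb(k, k) > x:
--         return k - 1
--     lo, hi = k, k + 1
--     while math.comb(hi, k) <= x:
--         lo, hi = hi, 2 * hi - k + 1
--     while hi - lo > 1:
--         mid = (lo + hi) // 2
--         if math.comb(mid, k) <= x:
--             lo = mid
--         else:
--             hi = mid
--     return lo
-- ===== Notes on version B (the rewrite author's own statement) =====
-- stated objective: faster
-- what changed: Replaces A's linear scan n=k,k+1,... (each step recomputing the binomial by a k-term product) with exponential bracketing of the answer followed by binary search on the monotone map n -> C(n,k).
import Mathlib
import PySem

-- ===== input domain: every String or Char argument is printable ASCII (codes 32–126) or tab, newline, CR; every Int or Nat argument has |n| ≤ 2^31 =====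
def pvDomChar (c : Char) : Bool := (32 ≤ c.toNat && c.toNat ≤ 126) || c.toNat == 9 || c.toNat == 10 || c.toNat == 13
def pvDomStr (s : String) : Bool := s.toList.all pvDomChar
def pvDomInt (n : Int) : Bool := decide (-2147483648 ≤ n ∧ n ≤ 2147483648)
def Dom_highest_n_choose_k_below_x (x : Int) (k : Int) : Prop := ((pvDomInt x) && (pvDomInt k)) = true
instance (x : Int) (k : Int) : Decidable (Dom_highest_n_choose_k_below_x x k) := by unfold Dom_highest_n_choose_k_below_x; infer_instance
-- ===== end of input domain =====

-- B replaces A's linear scan over n with exponential bracketing plus binary search on the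
-- monotone map n ↦ C(n,k); equivalence of return values is proved on Pre_ (k ≥ 1, or k = 0 with x < 1).

-- ===== PORT A =====
-- helper n_choose_k of Source A; math.factorial(k) ported as k.toNat.factorial (exact for k ≥ 0;
-- k < 0 raises ValueError in Python and is outside Pre_)
def n_choose_k (n : Int) (k : Int) : Int :=
  let prod := (PySem.List.pyRange 0 k 1).foldl (fun p i => p * (n - i)) 1
  PySem.Int.floordiv prod (Int.ofNat (Nat.factorial k.toNat))

-- A's 'while True' loop; the Nat argument is a fuel bound making the recursion total
-- (within Pre_ and Dom the loop always stops before the fuel runs out — proved below).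
def pvAloop (x : Int) (k : Int) : Nat → Int → Int
  | 0, n => n - 1
  | f+1, n => if x < n_choose_k n k then n - 1 else pvAloop x k f (n + 1)

def highest_n_choose_k_below_x (x : Int) (k : Int) : Int :=
  pvAloop x k (x.toNat + 1) k

-- ===== PORT B =====
-- math.comb ported as Nat.choose (exact for n, k ≥ 0; negative arguments raise in Python, outside Pre_)
def pvComb (n : Int) (k : Int) : Int := (Nat.choose n.toNat k.toNat : Int)

-- Source B's exponential-bracketing while loop; fuel 64 is a totality guard only
-- (hi - k at least doubles each step, so 64 steps cover every x in Dom — proved below).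
def pvExp (x : Int) (k : Int) : Nat → Int → Int → Int × Int
  | 0, lo, hi => (lo, hi)
  | f+1, lo, hi => if pvComb hi k ≤ x then pvExp x k f hi (2 * hi - k + 1) else (lo, hi)

-- Source B's binary-search while loop; the Nat argument is a fuel bound making the recursion
-- total (the gap hi - lo shrinks every step, so fuel = initial gap always suffices).
def pvBS (x : Int) (k : Int) : Nat → Int → Int → Int
  | 0, lo, _ => lo
  | t+1, lo, hi =>
    if 1 < hi - lo then
      let mid := PySem.Int.floordiv (lo + hi) 2
      if pvComb mid k ≤ x then pvBS x k t mid hi else pvBS x k t lo mid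
    else lo

def highest_n_choose_k_below_x_alt (x : Int) (k : Int) : Int :=
  if x < pvComb k k then k - 1
  else
    let p := pvExp x k 64 k (k + 1)
    pvBS x k (p.2 - p.1).toNat p.1 p.2

-- ===== PRECONDITION & SPEC =====
-- Pre_ excludes exactly the inputs where A does not return: k < 0 (math.factorial raises
-- ValueError) and k = 0 with x ≥ 1 (A's while loop never breaks, it diverges).
def Pre_highest_n_choose_k_below_x (x : Int) (k : Int) : Prop :=
  1 ≤ k ∨ (k = 0 ∧ x < 1)
instance (x : Int) (k : Int) : Decidable (Pre_highest_n_choose_k_below_x x k) := by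
  unfold Pre_highest_n_choose_k_below_x; infer_instance

def pvWitness_highest_n_choose_k_below_x : Int × Int := (10, 2)

def Spec_highest_n_choose_k_below_x (x : Int) (k : Int) (out : Int) : Prop := out = highest_n_choose_k_below_x_alt x k
instance (x : Int) (k : Int) (out : Int) : Decidable (Spec_highest_n_choose_k_below_x x k out) := by unfold Spec_highest_n_choose_k_below_x; infer_instance

-- ===== CLAIM (what is proved, stated in full; the proofs are below) =====
def Claim_equal_highest_n_choose_k_below_x : Prop := ∀ (x : Int) (k : Int), Dom_highest_n_choose_k_below_x x k → Pre_highest_n_choose_k_below_x x k → Spec_highest_n_choose_k_below_x x k (highest_n_choose_k_below_x x k)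

-- ===== LEMMAS AND PROOFS =====

-- the common characterisation: r is the largest n ≥ k-1 with C(n,k) ≤ x (C read as pvComb)
def pvGood (x : Int) (k : Int) (r : Int) : Prop :=
  k - 1 ≤ r ∧ (r = k - 1 ∨ pvComb r k ≤ x) ∧ x < pvComb (r + 1) k

lemma pvComb_mono {a b : Int} (k : Int) (h : a ≤ b) : pvComb a k ≤ pvComb b k := by
  unfold pvComb
  exact_mod_cast Nat.choose_le_choose k.toNat (by omega)

lemma choose_lb : ∀ (n K : Nat), 1 ≤ K → K ≤ n → n - K + 1 ≤ n.choose K := by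
  intro n
  induction n with
  | zero => intro K h1 h2; omega
  | succ m ih =>
    intro K h1 h2
    obtain ⟨j, rfl⟩ : ∃ j, K = j + 1 := ⟨K - 1, by omega⟩
    rcases Nat.lt_or_ge m (j + 1) with h | h
    · have : m + 1 = j + 1 := by omega
      simp [this, Nat.choose_self]
    · have h3 := ih (j + 1) h1 h
      have h4 : 1 ≤ m.choose j := Nat.choose_pos (by omega)
      have : (m + 1).choose (j + 1) = m.choose j + m.choose (j + 1) := Nat.choose_succ_succ m j
      omega

lemma pvComb_lb {n k : Int} (h1 : 1 ≤ k) (h2 : k ≤ n) : n - k + 1 ≤ pvComb n k := by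
  unfold pvComb
  have := choose_lb n.toNat k.toNat (by omega) (by omega)
  omega

lemma pvComb_self {k : Int} (hk : 0 ≤ k) : pvComb k k = 1 := by
  unfold pvComb; simp [Nat.choose_self]

-- the falling-factorial product of Source A equals descFactorial (for integer n ≥ K)
lemma prod_eq_desc : ∀ (K : Nat) (n : Int), (K : Int) ≤ n →
    (PySem.List.pyRange 0 (K : Int) 1).foldl (fun p i => p * (n - i)) 1
      = ((n.toNat).descFactorial K : Int) := by
  intro K
  induction K with
  | zero => intro n _; simp [PySem.List.pyRange]
  | succ m ih =>
    intro n hn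
    have hcast : ((m + 1 : Nat) : Int) = (m : Int) + 1 := by push_cast; ring
    rw [hcast, PySem.List.pyRange_one_succ_right (by omega), List.foldl_append]
    rw [ih n (by omega)]
    simp only [List.foldl]
    rw [Nat.descFactorial_succ]
    have : (n - (m : Int)) = ((n.toNat - m : Nat) : Int) := by omega
    rw [this]
    push_cast [Nat.sub_add_cancel]
    ring

lemma nck_eq_comb {n k : Int} (hk : 0 ≤ k) (hn : k ≤ n) : n_choose_k n k = pvComb n k := by
  obtain ⟨K, rfl⟩ : ∃ K : Nat, k = (K : Int) := ⟨k.toNat, by omega⟩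
  simp only [n_choose_k, pvComb]
  rw [prod_eq_desc K n hn]
  simp only [Int.toNat_natCast]
  rw [show Int.ofNat (Nat.factorial K) = ((Nat.factorial K : Nat) : Int) from rfl,
    PySem.Int.floordiv_natCast]
  simp [Nat.choose_eq_descFactorial_div_factorial]

lemma aloop_good (x k : Int) (hk : 0 ≤ k) :
    ∀ (f : Nat) (n : Int), k ≤ n → (n = k ∨ pvComb (n - 1) k ≤ x) →
      x < pvComb (n + (f : Int)) k → pvGood x k (pvAloop x k (f + 1) n) := by
  intro f
  induction f with
  | zero =>
    intro n h1 h2 h3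
    simp only [pvAloop]
    rw [nck_eq_comb hk h1]
    simp only [Int.natCast_zero, add_zero] at h3
    rw [if_pos h3]
    refine ⟨by omega, ?_, by simpa using h3⟩
    rcases h2 with h | h
    · exact Or.inl (by omega)
    · exact Or.inr h
  | succ f ih =>
    intro n h1 h2 h3
    simp only [pvAloop]
    rw [nck_eq_comb hk h1]
    by_cases hc : x < pvComb n k
    · rw [if_pos hc]
      refine ⟨by omega, ?_, by simpa using hc⟩
      rcases h2 with h | h
      · exact Or.inl (by omega)
      · exact Or.inr h
    · rw [if_neg hc]
      apply ih (n + 1) (by omega) (Or.inr (by simpa using not_lt.mp hc))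
      have : n + 1 + (f : Int) = n + ((f + 1 : Nat) : Int) := by push_cast; ring
      rw [this]; exact h3

lemma A_good (x k : Int) (hd : Dom_highest_n_choose_k_below_x x k)
    (hp : Pre_highest_n_choose_k_below_x x k) :
    pvGood x k (highest_n_choose_k_below_x x k) := by
  have hk : 0 ≤ k := by rcases hp with h | ⟨h, _⟩ <;> omega
  unfold highest_n_choose_k_below_x
  apply aloop_good x k hk x.toNat k le_rfl (Or.inl rfl)
  rcases lt_or_ge x 1 with hx | hx
  · have h1 : pvComb k k = 1 := pvComb_self hk
    have h2 : pvComb k k ≤ pvComb (k + (x.toNat : Int)) k := pvComb_mono k (by omega)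
    omega
  · have hk1 : 1 ≤ k := by
      rcases hp with hk1 | ⟨hz, hlt⟩
      · exact hk1
      · omega
    have hxt : (x.toNat : Int) = x := by omega
    have := pvComb_lb hk1 (show k ≤ k + (x.toNat : Int) by omega)
    omega

lemma exp_good (x k : Int) (hk : 1 ≤ k) :
    ∀ (f : Nat) (lo hi : Int), k ≤ lo → lo < hi → pvComb lo k ≤ x →
      x < (hi - k) * 2 ^ f →
      k ≤ (pvExp x k f lo hi).1 ∧ (pvExp x k f lo hi).1 < (pvExp x k f lo hi).2 ∧
        pvComb (pvExp x k f lo hi).1 k ≤ x ∧ x < pvComb (pvExp x k f lo hi).2 k := by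
  intro f
  induction f with
  | zero =>
    intro lo hi h1 h2 h3 h4
    simp only [pvExp]
    have hlb := pvComb_lb hk (show k ≤ hi by omega)
    have h4' : x < hi - k := by simpa using h4
    exact ⟨h1, h2, h3, show x < pvComb hi k by omega⟩
  | succ f ih =>
    intro lo hi h1 h2 h3 h4
    simp only [pvExp]
    by_cases hc : pvComb hi k ≤ x
    · rw [if_pos hc]
      apply ih hi (2 * hi - k + 1) (by omega) (by omega) hc
      have h5 : (hi - k) * 2 ^ (f + 1) ≤ (2 * hi - k + 1 - k) * 2 ^ f := by
        have h2f : (0:Int) ≤ 2 ^ f := by positivity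
        rw [pow_succ]
        nlinarith
      exact lt_of_lt_of_le h4 h5
    · rw [if_neg hc]
      exact ⟨h1, h2, h3, show x < pvComb hi k from not_le.mp hc⟩

lemma bs_good (x k : Int) :
    ∀ (t : Nat) (lo hi : Int), (hi - lo).toNat ≤ t → k ≤ lo → lo < hi →
      pvComb lo k ≤ x → x < pvComb hi k →
      k ≤ pvBS x k t lo hi ∧ pvComb (pvBS x k t lo hi) k ≤ x ∧
        x < pvComb (pvBS x k t lo hi + 1) k := by
  intro t
  induction t with
  | zero => intro lo hi ht h1 h2 _ _; exfalso; omega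
  | succ t ih =>
    intro lo hi ht h1 h2 h3 h4
    simp only [pvBS]
    by_cases hgap : 1 < hi - lo
    · rw [if_pos hgap]
      set mid := PySem.Int.floordiv (lo + hi) 2 with hmid
      have hb : lo < mid ∧ mid < hi := by
        rw [hmid, PySem.Int.floordiv_eq_ediv_of_pos (show (0:Int) < 2 by omega)]
        omega
      by_cases hc : pvComb mid k ≤ x
      · rw [if_pos hc]
        exact ih mid hi (by omega) (by omega) (by omega) hc h4
      · rw [if_neg hc]
        exact ih lo mid (by omega) h1 (by omega) h3 (by omega)
    · rw [if_neg hgap]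
      have : hi = lo + 1 := by omega
      exact ⟨h1, h3, by rw [← this]; exact h4⟩

lemma B_good (x k : Int) (hd : Dom_highest_n_choose_k_below_x x k)
    (hp : Pre_highest_n_choose_k_below_x x k) :
    pvGood x k (highest_n_choose_k_below_x_alt x k) := by
  have hk : 0 ≤ k := by rcases hp with h | ⟨h, _⟩ <;> omega
  unfold highest_n_choose_k_below_x_alt
  by_cases hc : x < pvComb k k
  · rw [if_pos hc]
    refine ⟨le_rfl, Or.inl rfl, ?_⟩
    simpa using hc
  · rw [if_neg hc]
    show pvGood x k (pvBS x k ((pvExp x k 64 k (k + 1)).2 - (pvExp x k 64 k (k + 1)).1).toNat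
      (pvExp x k 64 k (k + 1)).1 (pvExp x k 64 k (k + 1)).2)
    have hx1 : 1 ≤ x := by have := pvComb_self hk; omega
    have hk1 : 1 ≤ k := by
      rcases hp with h | ⟨hz, hlt⟩
      · exact h
      · omega
    have hxb : x ≤ 2147483648 := by
      simp only [Dom_highest_n_choose_k_below_x, pvDomInt, Bool.and_eq_true,
        decide_eq_true_eq] at hd
      omega
    have hinit : x < ((k + 1) - k) * 2 ^ (64 : Nat) := by norm_num; omega
    have hcombk : pvComb k k ≤ x := not_lt.mp hc
    have hE := exp_good x k hk1 64 k (k + 1) le_rfl (by omega) hcombk hinit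
    obtain ⟨e1, e2, e3, e4⟩ := hE
    have hB := bs_good x k ((pvExp x k 64 k (k + 1)).2 - (pvExp x k 64 k (k + 1)).1).toNat
      (pvExp x k 64 k (k + 1)).1 (pvExp x k 64 k (k + 1)).2 le_rfl e1 e2 e3 e4
    exact ⟨by omega, Or.inr hB.2.1, hB.2.2⟩

lemma good_unique {x k r1 r2 : Int} (h1 : pvGood x k r1) (h2 : pvGood x k r2) : r1 = r2 := by
  obtain ⟨a1, b1, c1⟩ := h1
  obtain ⟨a2, b2, c2⟩ := h2
  by_contra hne
  rcases lt_or_gt_of_ne hne with h | h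
  · have hle : pvComb r2 k ≤ x := by
      rcases b2 with hb | hb
      · exfalso; omega
      · exact hb
    have := pvComb_mono k (show r1 + 1 ≤ r2 by omega)
    omega
  · have hle : pvComb r1 k ≤ x := by
      rcases b1 with hb | hb
      · exfalso; omega
      · exact hb
    have := pvComb_mono k (show r2 + 1 ≤ r1 by omega)
    omega

-- ===== VERDICT (by name: the statement is the Claim_ definition above) =====
theorem highest_n_choose_k_below_x_spec : Claim_equal_highest_n_choose_k_below_x := by
  intro x k hd hp
  unfold Spec_highest_n_choose_k_below_x
  exact good_unique (A_good x k hd hp) (B_good x k hd hp)
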